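-- pv_equiv track=rewrite | github.com/htang7415/Code-Lab | modules/databases/caching/semantic-cache-hit-rate-analysis/python/semantic_cache_hit_rate_analysis.py | latency_saved_ms
-- ===== SOURCE A (Python) =====
-- def latency_saved_ms(
--     events: list[dict[str, object]],
--     hit_latency_ms: int,
--     miss_latency_ms: int,
-- ) -> int:
--     baseline = len(events) * miss_latency_ms
--     actual = sum(hit_latency_ms if bool(event["hit"]) else miss_latency_ms for event in events)
--     return baseline - actual
-- ===== SOURCE B (Python) =====
-- def latency_saved_ms(
--     events: list[dict[str, object]],
--     hit_latency_ms: int,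
--     miss_latency_ms: int,
-- ) -> int:
--     flags = [bool(event["hit"]) for event in events]
--     return flags.count(True) * (miss_latency_ms - hit_latency_ms)
-- ===== Notes on version B (the rewrite author's own statement) =====
-- stated objective: simpler
-- what changed: B first materialises the list of boolean hit flags, then returns count(True) times the latency delta as a closed form, instead of A's two running totals (baseline and actual) subtracted at the end.
import Mathlib
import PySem

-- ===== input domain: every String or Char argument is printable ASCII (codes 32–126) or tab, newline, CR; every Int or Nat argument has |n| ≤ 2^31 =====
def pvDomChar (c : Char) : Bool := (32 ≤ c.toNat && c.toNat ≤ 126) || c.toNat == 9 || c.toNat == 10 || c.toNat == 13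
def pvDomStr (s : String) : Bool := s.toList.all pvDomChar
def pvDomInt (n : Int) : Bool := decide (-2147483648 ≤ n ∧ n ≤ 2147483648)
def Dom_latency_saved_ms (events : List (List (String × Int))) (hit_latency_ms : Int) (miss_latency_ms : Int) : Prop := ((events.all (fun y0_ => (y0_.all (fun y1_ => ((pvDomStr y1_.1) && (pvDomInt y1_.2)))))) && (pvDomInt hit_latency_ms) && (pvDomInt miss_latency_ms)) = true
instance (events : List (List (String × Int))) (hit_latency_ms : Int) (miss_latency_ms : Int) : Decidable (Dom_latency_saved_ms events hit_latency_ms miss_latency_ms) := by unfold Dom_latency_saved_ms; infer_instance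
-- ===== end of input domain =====

-- B materialises the boolean hit-flag list and returns count(True)*(miss−hit) as a closed form, instead of A's two running totals subtracted: a simpler decomposition, same O(n) cost.


-- ===== PORT A =====
-- dict[str,object] arrives as an association list; event["hit"] = value of the first "hit" pair (none = KeyError)
def pvHit? (ev : List (String × Int)) : Option Int := (ev.find? (fun p => p.1 == "hit")).map Prod.snd

def latency_saved_ms (events : List (List (String × Int))) (hit_latency_ms : Int) (miss_latency_ms : Int) : Int :=
  -- baseline = len(events) * miss_latency_ms
  let baseline := (events.length : Int) * miss_latency_ms
  -- actual = sum(hit if bool(event["hit"]) else miss for event in events)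
  -- event["hit"] ported via pvHit?; Pre_ excludes the KeyError (none) case, so getD 0 is exact there
  let actual := events.foldl (fun acc ev => acc + (if ((pvHit? ev).getD 0) ≠ 0 then hit_latency_ms else miss_latency_ms)) 0
  baseline - actual

-- ===== PORT B =====
def latency_saved_ms_alt (events : List (List (String × Int))) (hit_latency_ms : Int) (miss_latency_ms : Int) : Int :=
  -- flags = [bool(event["hit"]) for event in events]
  let flags := events.map (fun ev => ((pvHit? ev).getD 0) != 0)
  -- flags.count(True) * (miss_latency_ms - hit_latency_ms)
  (PySem.List.count flags true : Int) * (miss_latency_ms - hit_latency_ms)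

-- ===== PRECONDITION & SPEC =====
-- Pre_ excludes exactly the inputs where some event lacks a "hit" key, on which A raises KeyError.
def Pre_latency_saved_ms (events : List (List (String × Int))) (hit_latency_ms : Int) (miss_latency_ms : Int) : Prop :=
  ∀ ev ∈ events, "hit" ∈ ev.map Prod.fst
instance (events : List (List (String × Int))) (hit_latency_ms : Int) (miss_latency_ms : Int) : Decidable (Pre_latency_saved_ms events hit_latency_ms miss_latency_ms) := by unfold Pre_latency_saved_ms; infer_instance
def pvWitness_latency_saved_ms : (List (List (String × Int))) × Int × Int := ([[("hit", 1)], [("hit", 0)]], 5, 20)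
def Spec_latency_saved_ms (events : List (List (String × Int))) (hit_latency_ms : Int) (miss_latency_ms : Int) (out : Int) : Prop := out = latency_saved_ms_alt events hit_latency_ms miss_latency_ms
instance (events : List (List (String × Int))) (hit_latency_ms : Int) (miss_latency_ms : Int) (out : Int) : Decidable (Spec_latency_saved_ms events hit_latency_ms miss_latency_ms out) := by unfold Spec_latency_saved_ms; infer_instance

-- ===== CLAIM (what is proved, stated in full; the proofs are below) =====
def Claim_equal_latency_saved_ms : Prop := ∀ (events : List (List (String × Int))) (hit_latency_ms : Int) (miss_latency_ms : Int), Dom_latency_saved_ms events hit_latency_ms miss_latency_ms → Pre_latency_saved_ms events hit_latency_ms miss_latency_ms → Spec_latency_saved_ms events hit_latency_ms miss_latency_ms (latency_saved_ms events hit_latency_ms miss_latency_ms)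

-- ===== LEMMAS AND PROOFS =====
theorem latency_saved_ms_core (events : List (List (String × Int))) (hit_latency_ms miss_latency_ms : Int) :
    latency_saved_ms events hit_latency_ms miss_latency_ms = latency_saved_ms_alt events hit_latency_ms miss_latency_ms := by
  unfold latency_saved_ms latency_saved_ms_alt
  simp only [PySem.List.foldl_add, PySem.List.count]
  induction events with
  | nil => simp
  | cons ev rest ih =>
    simp only [List.map_cons, List.sum_cons, List.length_cons, List.count_cons]
    by_cases h : ((pvHit? ev).getD 0) ≠ 0
    · have hb : (((pvHit? ev).getD 0) != 0) = true := by simpa [bne_iff_ne] using h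
      simp only [if_pos h, hb, beq_self_eq_true, if_true]
      push_cast
      linear_combination ih
    · have h0 : ((pvHit? ev).getD 0) = 0 := by omega
      have hb : (((pvHit? ev).getD 0) != 0) = false := by simp [h0]
      simp only [if_neg h, hb, show ((false == true) = true) = False by simp, if_false]
      push_cast
      linear_combination ih

-- ===== VERDICT (by name: the statement is the Claim_ definition above) =====
theorem latency_saved_ms_spec : Claim_equal_latency_saved_ms := by
  intro events h m _ _
  unfold Spec_latency_saved_ms
  exact latency_saved_ms_core events h m
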